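-- pv_equiv track=rewrite | github.com/TanushV/EQUITR-coder | equitrcoder/tools/builtin/audit.py | parse_audit_findings
-- ===== SOURCE A (Python) =====
-- from typing import Any, Dict, List, Optional
--
-- def parse_audit_findings(audit_result: str) -> List[Dict[str, Any]]:
--     """Parse audit result to extract specific issues for todo creation."""
--     findings = []
--
--     # Look for common audit failure patterns
--     lines = audit_result.split("\n")
--     current_issue = None
--
--     for line in lines:
--         line = line.strip()
--         if not line:
--             continue
--
--         # Detect issue indicators
--         if any(
--             indicator in line.lower()
--             for indicator in [
--                 "missing",
--                 "error",
--                 "failed",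
--                 "incomplete",
--                 "todo:",
--                 "fix:",
--                 "issue:",
--             ]
--         ):
--             if current_issue:
--                 findings.append(current_issue)
--
--             current_issue = {
--                 "title": line[:100],  # Truncate long titles
--                 "description": line,
--                 "priority": (
--                     "high"
--                     if any(
--                         urgent in line.lower()
--                         for urgent in ["critical", "error", "failed"]
--                     )
--                     else "medium"
--                 ),
--             }
--         elif current_issue and line:
--             # Add additional context to current issue
--             current_issue["description"] += f"\n{line}"
--
--     # Add the last issue if exists
--     if current_issue:
--         findings.append(current_issue)
--
--     # If no specific issues found, create a general issue
--     if not findings: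
--         findings.append(
--             {
--                 "title": "General audit failure - requires investigation",
--                 "description": f"Audit failed but no specific issues were identified.\n\nFull audit result:\n{audit_result}",
--                 "priority": "medium",
--             }
--         )
--
--     return findings
-- ===== SOURCE B (Python) =====
-- from typing import Any, Dict, List, Optional
--
-- _INDICATORS = ("missing", "error", "failed", "incomplete", "todo:", "fix:", "issue:")
-- _URGENT = ("critical", "error", "failed")
--
--
-- def _is_indicator(line: str) -> bool:
--     low = line.lower()
--     return any(k in low for k in _INDICATORS)
--
--
-- def parse_audit_findings(audit_result: str) -> List[Dict[str, Any]]: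
--     """Parse audit result to extract specific issues for todo creation.
--
--     Two-phase version: first keep the stripped non-empty lines, then cut that
--     list into blocks, each starting at an indicator line and running up to the
--     next indicator line."""
--     lines = [s for s in (raw.strip() for raw in audit_result.split("\n")) if s]
--     findings = []
--     i, n = 0, len(lines)
--     while i < n:
--         if not _is_indicator(lines[i]):
--             i += 1
--             continue
--         j = i + 1
--         while j < n and not _is_indicator(lines[j]):
--             j += 1
--         head = lines[i]
--         findings.append(
--             {
--                 "title": head[:100],
--                 "description": "\n".join(lines[i:j]),
--                 "priority": (
--                     "high"
--                     if any(u in head.lower() for u in _URGENT)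
--                     else "medium"
--                 ),
--             }
--         )
--         i = j
--     if not findings:
--         findings.append(
--             {
--                 "title": "General audit failure - requires investigation",
--                 "description": f"Audit failed but no specific issues were identified.\n\nFull audit result:\n{audit_result}",
--                 "priority": "medium",
--             }
--         )
--     return findings
-- ===== Notes on version B (the rewrite author's own statement) =====
-- stated objective: alternative
-- what changed: B replaces A's single-pass accumulator (a mutable current-issue dict whose description grows line by line) by a two-phase block scan: first keep the stripped non-empty lines, then cut them into blocks at indicator lines and build each finding from its whole block at once (join instead of repeated appends).
import Mathlib
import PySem

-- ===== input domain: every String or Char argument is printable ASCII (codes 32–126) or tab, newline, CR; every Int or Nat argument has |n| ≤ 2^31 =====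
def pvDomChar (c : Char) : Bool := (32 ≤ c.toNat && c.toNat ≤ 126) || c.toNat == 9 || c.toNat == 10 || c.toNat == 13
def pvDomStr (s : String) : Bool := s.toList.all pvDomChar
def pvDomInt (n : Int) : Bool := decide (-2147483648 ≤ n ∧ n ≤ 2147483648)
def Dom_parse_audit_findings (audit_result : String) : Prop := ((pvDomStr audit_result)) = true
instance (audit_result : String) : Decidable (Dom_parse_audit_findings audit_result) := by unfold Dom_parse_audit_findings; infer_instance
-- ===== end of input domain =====

-- B replaces A's single-pass accumulator (mutable current-issue dict) by a two-phase
-- block scan over the stripped non-empty lines (alternative decomposition, same cost).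


-- shared keyword predicates (the same `any(k in line.lower() for k in …)` expressions occur in both Pythons)
def pvIndic (line : String) : Bool :=
  (["missing", "error", "failed", "incomplete", "todo:", "fix:", "issue:"]).any
    (fun k => PySem.Str.isIn k (PySem.Str.lower line))

def pvUrgent (line : String) : Bool :=
  (["critical", "error", "failed"]).any (fun k => PySem.Str.isIn k (PySem.Str.lower line))

-- the fallback "general issue" dict (identical literal in both Pythons)
-- audit_result.split("\n") for both ports; "\n" ≠ "", so Str.split? returns some (exact)
def pvSplitNL (s : String) : List String := (PySem.Str.split? s "\n").getD []

def pvGeneral (audit_result : String) : List (String × String) :=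
  [("title", "General audit failure - requires investigation"),
   ("description", "Audit failed but no specific issues were identified.\n\nFull audit result:\n" ++ audit_result),
   ("priority", "medium")]

-- ===== PORT A =====
-- A's current_issue dict has the three fixed keys title/description/priority created at
-- once and only its "description" value mutated, so it is carried as a triple and
-- rendered as the assoc list (in A's key insertion order) when appended to findings.
def pvIssueDict (c : String × String × String) : List (String × String) :=
  [("title", c.1), ("description", c.2.1), ("priority", c.2.2)]

def pvStepA (st : List (List (String × String)) × Option (String × String × String))
    (raw : String) : List (List (String × String)) × Option (String × String × String) :=
  let line := PySem.Str.strip raw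
  if line = "" then st
  else if pvIndic line then
    ((match st.2 with | some c => st.1 ++ [pvIssueDict c] | none => st.1),
     some (PySem.Str.slice line none (some 100), line,
           if pvUrgent line then "high" else "medium"))
  else
    match st.2 with
    | some c => (st.1, some (c.1, c.2.1 ++ "\n" ++ line, c.2.2))
    | none => st

def parse_audit_findings (audit_result : String) : List (List (String × String)) :=
  let lines := pvSplitNL audit_result
  let st := lines.foldl pvStepA ([], none)
  let findings := match st.2 with | some c => st.1 ++ [pvIssueDict c] | none => st.1
  if findings = [] then [pvGeneral audit_result] else findings

-- ===== PORT B =====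
def pvFinding (head : String) (ctx : List String) : List (String × String) :=
  [("title", PySem.Str.slice head none (some 100)),
   ("description", PySem.Str.join "\n" (head :: ctx)),
   ("priority", if pvUrgent head then "high" else "medium")]

-- the outer while loop of Source B: skip non-indicator lines; at an indicator line the
-- inner while loop scans to the next indicator (takeWhile/dropWhile) and emits a block
def pvBlocks : List String → List (List (String × String))
  | [] => []
  | l :: rest =>
    if pvIndic l then
      pvFinding l (rest.takeWhile (fun x => !pvIndic x))
        :: pvBlocks (rest.dropWhile (fun x => !pvIndic x))
    else pvBlocks rest
termination_by l => l.length
decreasing_by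
  · simpa using Nat.lt_succ_of_le (List.length_dropWhile_le _ _)
  · simp

def parse_audit_findings_alt (audit_result : String) : List (List (String × String)) :=
  let lines := ((pvSplitNL audit_result).map PySem.Str.strip).filter (fun x => x ≠ "")
  let findings := pvBlocks lines
  if findings.isEmpty then [pvGeneral audit_result] else findings

-- ===== PRECONDITION & SPEC =====
def Spec_parse_audit_findings (audit_result : String) (out : List (List (String × String))) : Prop := out = parse_audit_findings_alt audit_result
instance (audit_result : String) (out : List (List (String × String))) : Decidable (Spec_parse_audit_findings audit_result out) := by unfold Spec_parse_audit_findings; infer_instance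

-- ===== CLAIM (what is proved, stated in full; the proofs are below) =====
def Claim_equal_parse_audit_findings : Prop := ∀ (audit_result : String), Dom_parse_audit_findings audit_result → Spec_parse_audit_findings audit_result (parse_audit_findings audit_result)

-- ===== LEMMAS AND PROOFS =====

-- A's per-raw-line step, on the stripped non-empty lines
def pvCore (st : List (List (String × String)) × Option (String × String × String))
    (line : String) : List (List (String × String)) × Option (String × String × String) :=
  if pvIndic line then
    ((match st.2 with | some c => st.1 ++ [pvIssueDict c] | none => st.1),
     some (PySem.Str.slice line none (some 100), line,
           if pvUrgent line then "high" else "medium"))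
  else
    match st.2 with
    | some c => (st.1, some (c.1, c.2.1 ++ "\n" ++ line, c.2.2))
    | none => st

lemma pvStepA_eq_core (st : List (List (String × String)) × Option (String × String × String))
    (raw : String) :
    pvStepA st raw = if PySem.Str.strip raw = "" then st else pvCore st (PySem.Str.strip raw) := by
  simp [pvStepA, pvCore]

lemma foldl_stepA_filter (lines : List String)
    (st : List (List (String × String)) × Option (String × String × String)) :
    lines.foldl pvStepA st
      = ((lines.map PySem.Str.strip).filter (fun x => x ≠ "")).foldl pvCore st := by
  induction lines generalizing st with
  | nil => rfl
  | cons l rest ih =>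
    simp only [List.foldl_cons, List.map_cons, List.filter_cons, pvStepA_eq_core]
    by_cases h : PySem.Str.strip l = "" <;> simp [h, ih]

lemma chars_join_cons (sep a b : List Char) (r : List (List Char)) :
    PySem.Chars.join sep ((a ++ sep ++ b) :: r) = a ++ sep ++ PySem.Chars.join sep (b :: r) := by
  cases r with
  | nil => rw [PySem.Chars.join_singleton, PySem.Chars.join_singleton]
  | cons c r' =>
    rw [PySem.Chars.join_cons_cons, PySem.Chars.join_cons_cons]
    simp [List.append_assoc]

lemma str_join_cons_cons (x y : String) (r : List String) :
    PySem.Str.join "\n" (x :: y :: r) = x ++ "\n" ++ PySem.Str.join "\n" (y :: r) := by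
  apply String.toList_inj.mp
  simp only [PySem.Str.toList_join, String.toList_append, List.map_cons]
  exact PySem.Chars.join_cons_cons _ _ _ _

lemma join_cons (x y : String) (ctx : List String) :
    PySem.Str.join "\n" ((x ++ "\n" ++ y) :: ctx) = x ++ "\n" ++ PySem.Str.join "\n" (y :: ctx) := by
  apply String.toList_inj.mp
  simp only [PySem.Str.toList_join, String.toList_append, List.map_cons]
  exact chars_join_cons "\n".toList x.toList y.toList (ctx.map String.toList)

lemma foldl_desc_join (ctx : List String) (x : String) :
    ctx.foldl (fun d l => d ++ "\n" ++ l) x = PySem.Str.join "\n" (x :: ctx) := by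
  induction ctx generalizing x with
  | nil =>
    apply String.toList_inj.mp
    simp [PySem.Str.toList_join, PySem.Chars.join_singleton]
  | cons y ctx' ih =>
    simp only [List.foldl_cons]
    rw [ih (x ++ "\n" ++ y), join_cons]
    exact (str_join_cons_cons x y ctx').symm

-- flush of A's final state
def pvFlush (st : List (List (String × String)) × Option (String × String × String)) :
    List (List (String × String)) :=
  match st.2 with | some c => st.1 ++ [pvIssueDict c] | none => st.1

lemma core_withCur (rest : List String) :
    ∀ (acc : List (List (String × String))) (t d p : String),
    pvFlush (rest.foldl pvCore (acc, some (t, d, p)))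
      = acc ++ [[("title", t),
                 ("description", (rest.takeWhile (fun x => !pvIndic x)).foldl (fun d l => d ++ "\n" ++ l) d),
                 ("priority", p)]]
          ++ pvBlocks (rest.dropWhile (fun x => !pvIndic x)) := by
  induction rest with
  | nil => intro acc t d p; simp [pvFlush, pvBlocks, pvIssueDict]
  | cons x r ih =>
    intro acc t d p
    by_cases hx : pvIndic x
    · simp only [List.foldl_cons, pvCore, hx, if_pos, List.takeWhile_cons, List.dropWhile_cons]
      rw [ih]
      simp [pvBlocks, pvFinding, pvIssueDict, foldl_desc_join]
      intro h
      simp [h] at hx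
    · simp only [List.foldl_cons, pvCore, hx, if_neg, Bool.false_eq_true, not_false_iff,
        List.takeWhile_cons, List.dropWhile_cons]
      rw [ih]
      simp

lemma core_noCur (L : List String) (acc : List (List (String × String))) :
    pvFlush (L.foldl pvCore (acc, none)) = acc ++ pvBlocks L := by
  induction L generalizing acc with
  | nil => simp [pvFlush, pvBlocks]
  | cons l rest ih =>
    by_cases hl : pvIndic l
    · simp only [List.foldl_cons, pvCore, hl, if_pos]
      rw [core_withCur]
      simp [pvBlocks, hl, pvFinding, foldl_desc_join]
    · simp only [List.foldl_cons, pvCore, hl, if_neg, Bool.false_eq_true, not_false_iff]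
      rw [ih]
      simp [pvBlocks, hl]

-- ===== VERDICT (by name: the statement is the Claim_ definition above) =====
theorem parse_audit_findings_spec : Claim_equal_parse_audit_findings := by
  intro s _
  unfold Spec_parse_audit_findings parse_audit_findings parse_audit_findings_alt
  have key : pvFlush ((pvSplitNL s).foldl pvStepA ([], none))
      = pvBlocks (((pvSplitNL s).map PySem.Str.strip).filter (fun x => x ≠ "")) := by
    rw [foldl_stepA_filter]
    simpa using core_noCur (((pvSplitNL s).map PySem.Str.strip).filter (fun x => x ≠ "")) []
  simp only [pvFlush] at key
  simp only [key, List.isEmpty_iff]
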